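-- pv_equiv track=rewrite | github.com/jay-sambhu/IS-cipher-text-codes | FeistelCipher.py | generate_round_keys
-- ===== SOURCE A (Python) =====
-- def left_rotate(bits, n):
--     """Rotate bits to the left by n."""
--     n %= len(bits)
--     return bits[n:] + bits[:n]
--
-- def generate_round_keys(key_64bit, rounds=16):
--     """
--     Generate 16 simple 32-bit round keys from a 64-bit master key.
--     This is NOT the real DES key schedule.
--     It is only for educational Feistel demonstration.
--     """
--     keys = []
--     current = key_64bit
--
--     for i in range(rounds):
--         current = left_rotate(current, i + 1)
--         round_key = current[:32]
--         keys.append(round_key)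
--
--     return keys
-- ===== SOURCE B (Python) =====
-- def left_rotate(bits, n):
--     """Rotate bits to the left by n."""
--     n %= len(bits)
--     return bits[n:] + bits[:n]
--
-- def generate_round_keys(key_64bit, rounds=16):
--     """Round key i is the ORIGINAL master key rotated by the closed-form
--     triangular offset (i+1)(i+2)//2: no rotating state is carried at all."""
--     return [left_rotate(key_64bit, (i + 1) * (i + 2) // 2)[:32]
--             for i in range(rounds)]
-- ===== Notes on version B (the rewrite author's own statement) =====
-- stated objective: alternative
-- what changed: B replaces the stateful loop that carries a rotating string accumulator by a state-free list comprehension: each round key is the original master key rotated by the closed-form triangular offset (i+1)(i+2)//2, since left-rotations compose additively mod the key length.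
import Mathlib
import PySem

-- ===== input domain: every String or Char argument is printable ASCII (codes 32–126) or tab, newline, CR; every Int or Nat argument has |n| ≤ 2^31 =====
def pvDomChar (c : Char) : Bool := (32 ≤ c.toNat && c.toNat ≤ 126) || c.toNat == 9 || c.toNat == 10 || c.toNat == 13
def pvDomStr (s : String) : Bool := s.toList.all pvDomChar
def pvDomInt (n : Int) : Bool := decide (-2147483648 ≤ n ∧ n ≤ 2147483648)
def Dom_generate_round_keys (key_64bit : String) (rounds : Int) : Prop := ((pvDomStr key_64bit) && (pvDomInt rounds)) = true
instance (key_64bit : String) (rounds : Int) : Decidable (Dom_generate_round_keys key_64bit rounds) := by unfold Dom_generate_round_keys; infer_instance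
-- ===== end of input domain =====

-- B replaces the stateful rotating-accumulator loop by a state-free comprehension rotating the original key by the closed-form triangular offset (alternative decomposition, same cost).


-- ===== PORT A =====
-- shared module helper: left_rotate(bits, n) = bits[n:] + bits[:n] after n %= len(bits)
def left_rotate (bits : String) (n : Int) : String :=
  let m := PySem.Int.mod n (bits.toList.length : Int)
  String.ofList (PySem.List.slice bits.toList (some m) none ++ PySem.List.slice bits.toList none (some m))

def generate_round_keys (key_64bit : String) (rounds : Int) : List String :=
  ((PySem.List.pyRange 0 rounds 1).foldl
    (fun (st : List String × String) i =>
      let current := left_rotate st.2 (i + 1)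
      let round_key := String.ofList (PySem.List.slice current.toList none (some 32))
      (st.1 ++ [round_key], current))
    ([], key_64bit)).1

-- ===== PORT B =====
def generate_round_keys_alt (key_64bit : String) (rounds : Int) : List String :=
  (PySem.List.pyRange 0 rounds 1).map
    (fun i =>
      String.ofList (PySem.List.slice
        (left_rotate key_64bit (PySem.Int.floordiv ((i + 1) * (i + 2)) 2)).toList
        none (some 32)))

-- ===== PRECONDITION & SPEC =====
-- Pre_ excludes exactly the inputs where the Python A raises ZeroDivisionError (empty key with at least one round); B raises there too.
def Pre_generate_round_keys (key_64bit : String) (rounds : Int) : Prop :=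
  key_64bit ≠ "" ∨ rounds ≤ 0
instance (key_64bit : String) (rounds : Int) : Decidable (Pre_generate_round_keys key_64bit rounds) := by unfold Pre_generate_round_keys; infer_instance

def pvWitness_generate_round_keys : String × Int := ("ABCDEFGH", 4)

def Spec_generate_round_keys (key_64bit : String) (rounds : Int) (out : List String) : Prop := out = generate_round_keys_alt key_64bit rounds
instance (key_64bit : String) (rounds : Int) (out : List String) : Decidable (Spec_generate_round_keys key_64bit rounds out) := by unfold Spec_generate_round_keys; infer_instance

-- ===== CLAIM (what is proved, stated in full; the proofs are below) =====
def Claim_equal_generate_round_keys : Prop := ∀ (key_64bit : String) (rounds : Int), Dom_generate_round_keys key_64bit rounds → Pre_generate_round_keys key_64bit rounds → Spec_generate_round_keys key_64bit rounds (generate_round_keys key_64bit rounds)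

-- ===== LEMMAS AND PROOFS =====

-- triangular numbers: cumulative rotation offset after n rounds
def pvTri : Nat → Nat
  | 0 => 0
  | n + 1 => pvTri n + (n + 1)

-- the common value of the first n round keys
def pvKeys (l : List Char) : Nat → List String
  | 0 => []
  | n + 1 => pvKeys l n ++ [String.ofList ((l.rotate (pvTri (n + 1))).take 32)]

lemma pvTri_formula (n : Nat) : 2 * pvTri n = n * (n + 1) := by
  induction n with
  | zero => rfl
  | succ n ih =>
    show 2 * (pvTri n + (n + 1)) = (n + 1) * (n + 1 + 1)
    rw [Nat.mul_add, ih]; ring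

lemma left_rotate_eq (s : String) (n : Int) (hn : 0 ≤ n) :
    left_rotate s n = String.ofList (s.toList.rotate n.toNat) := by
  unfold left_rotate
  cases h : s.toList with
  | nil => simp [PySem.List.slice]
  | cons c cs =>
    rw [← h]
    have hlen : (0 : Int) < (s.toList.length : Int) := by
      simp [h]
    have hmod : PySem.Int.mod n (s.toList.length : Int) = n % (s.toList.length : Int) :=
      PySem.Int.mod_eq_emod_of_pos hlen
    have hm0 : 0 ≤ n % (s.toList.length : Int) := Int.emod_nonneg _ (by omega)
    have hmnat : (n % (s.toList.length : Int)).toNat = n.toNat % s.toList.length := by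
      have h' : n % (s.toList.length : Int) = ((n.toNat % s.toList.length : Nat) : Int) := by
        conv_lhs => rw [show n = ((n.toNat : Nat) : Int) from by omega]
        rw [← Int.natCast_mod]
      rw [h', Int.toNat_natCast]
    simp only [hmod]
    rw [PySem.List.slice_from _ hm0, PySem.List.slice_to _ hm0, hmnat]
    have hle : n.toNat % s.toList.length ≤ s.toList.length :=
      le_of_lt (Nat.mod_lt _ (by simp [h]))
    rw [← List.rotate_mod, List.rotate_eq_drop_append_take hle]

lemma foldA_eq (key : String) (n : Nat) :
    ((List.range n).map (fun k => ((0 : Int) + (k : Nat)))).foldl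
      (fun (st : List String × String) i =>
        let current := left_rotate st.2 (i + 1)
        let round_key := String.ofList (PySem.List.slice current.toList none (some 32))
        (st.1 ++ [round_key], current))
      ([], key)
    = (pvKeys key.toList n, String.ofList (key.toList.rotate (pvTri n))) := by
  induction n with
  | zero => simp [pvKeys, pvTri, List.rotate_zero, String.ofList_toList]
  | succ n ih =>
    rw [List.range_succ, List.map_append, List.foldl_append, ih]
    simp only [List.map_cons, List.map_nil, List.foldl_cons, List.foldl_nil]
    have h1 : left_rotate (String.ofList (key.toList.rotate (pvTri n))) ((0 : Int) + (n : Nat) + 1)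
        = String.ofList (key.toList.rotate (pvTri (n + 1))) := by
      rw [left_rotate_eq _ _ (by omega)]
      simp [String.toList_ofList, List.rotate_rotate, pvTri]
    simp only [h1]
    simp [pvKeys, String.toList_ofList, PySem.List.slice_to]

lemma mapB_eq (key : String) (n : Nat) :
    ((List.range n).map (fun k => ((0 : Int) + (k : Nat)))).map
      (fun i =>
        String.ofList (PySem.List.slice
          (left_rotate key (PySem.Int.floordiv ((i + 1) * (i + 2)) 2)).toList
          none (some 32)))
    = pvKeys key.toList n := by
  induction n with
  | zero => simp [pvKeys]
  | succ n ih =>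
    rw [List.range_succ, List.map_append, List.map_append, ih]
    simp only [List.map_cons, List.map_nil]
    have hdiv : PySem.Int.floordiv ((((0 : Int) + (n : Nat)) + 1) * (((0 : Int) + (n : Nat)) + 2)) 2
        = ((pvTri (n + 1) : Nat) : Int) := by
      have h2 : (((n : Nat) : Int) + 1) * (((n : Nat) : Int) + 2) = 2 * ((pvTri (n + 1) : Nat) : Int) := by
        exact_mod_cast (pvTri_formula (n + 1)).symm
      rw [zero_add, h2, PySem.Int.floordiv_eq_ediv_of_pos (by omega)]
      omega
    rw [hdiv, left_rotate_eq _ _ (by omega)]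
    simp [pvKeys, String.toList_ofList, PySem.List.slice_to]

-- ===== VERDICT (by name: the statement is the Claim_ definition above) =====
theorem generate_round_keys_spec : Claim_equal_generate_round_keys := by
  intro key rounds _ _
  unfold Spec_generate_round_keys generate_round_keys generate_round_keys_alt
  rw [PySem.List.pyRange_one]
  simp only [Int.sub_zero]
  rw [foldA_eq, mapB_eq]
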